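-- pv_equiv track=rewrite | github.com/lucadimascolo/skasz | skasz/senscalc/mid/calculator.py | clean_overrides
-- ===== SOURCE A (Python) =====
-- OVERRIDE_DOUBLE_ENTRIES = {
--     "alpha": {"alpha_ska", "alpha_meer"},
--     "target": {"target_ska", "target_meer"},
--     "subarray_configuration": {
--         "array_configuration_meer",
--         "array_configuration_ska",
--     },
-- }
--
-- def clean_overrides(overrides):
--     """Function to provide a clean set of overrides in which duplicated overrides for a single
--     parameter are translated into the name of the single parameter.
--     For example, "alpha" corresponds to a simgle parameter that is returned only if it appears
--     as "alpha_ska" and "alpha_meer" simultaneously in the original set of overrides.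
--     """
--     output = overrides.copy()
--     for parameter, entries in OVERRIDE_DOUBLE_ENTRIES.items():
--         if not entries.difference(output):
--             output = output.union(
--                 {parameter}
--             )  # Adds the name of the parameter to the output set
--         output = output.difference(
--             entries
--         )  # Removes the duplicate override flags always
--     return output
-- ===== SOURCE B (Python) =====
-- FLAG_TO_PARAM = {
--     "alpha_ska": "alpha",
--     "alpha_meer": "alpha",
--     "target_ska": "target",
--     "target_meer": "target",
--     "array_configuration_meer": "subarray_configuration",
--     "array_configuration_ska": "subarray_configuration",
-- }
--
-- PARAMETERS = ["alpha", "target", "subarray_configuration"]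
--
--
-- def clean_overrides(overrides):
--     """Single pass over the input through a reverse flag->parameter lookup: keep every
--     non-flag override and count flag occurrences per parameter; a parameter is emitted
--     when both of its flags were seen (count == 2)."""
--     kept = set()
--     counts = {}
--     for x in overrides:
--         if x in FLAG_TO_PARAM:
--             p = FLAG_TO_PARAM[x]
--             counts[p] = counts.get(p, 0) + 1
--         else:
--             kept.add(x)
--     return kept | {p for p in PARAMETERS if counts.get(p, 0) == 2}
-- ===== Notes on version B (the rewrite author's own statement) =====
-- stated objective: alternative
-- what changed: Instead of iterating over the constant parameter->flags dict and doing a whole-set difference test, a union and a difference per entry, B makes a single pass over the input through a reverse flag->parameter lookup, keeping non-flag entries and counting flag occurrences per parameter, then emits each parameter whose count is 2.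
import Mathlib
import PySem

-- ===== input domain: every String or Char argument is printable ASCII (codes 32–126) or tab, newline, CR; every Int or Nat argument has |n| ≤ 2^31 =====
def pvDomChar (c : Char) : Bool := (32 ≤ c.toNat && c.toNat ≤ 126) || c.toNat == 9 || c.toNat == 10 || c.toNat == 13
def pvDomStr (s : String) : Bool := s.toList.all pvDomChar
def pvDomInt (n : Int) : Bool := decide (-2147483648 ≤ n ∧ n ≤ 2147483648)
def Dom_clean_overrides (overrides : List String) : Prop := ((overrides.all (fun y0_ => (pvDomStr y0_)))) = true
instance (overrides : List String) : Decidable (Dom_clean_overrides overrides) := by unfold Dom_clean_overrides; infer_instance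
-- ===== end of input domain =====

-- B replaces A's scan of the constant dict (with per-entry set union/difference passes over the
-- whole working set) by a single pass over the input through a reverse flag→parameter lookup and
-- an occurrence counter (objective: alternative/simpler single-pass structure).

-- ===== PORT A =====
def OVERRIDE_DOUBLE_ENTRIES : PySem.Dict String (PySem.Set String) :=
  PySem.Dict.ofList
    [("alpha", PySem.Set.ofList ["alpha_ska", "alpha_meer"]),
     ("target", PySem.Set.ofList ["target_ska", "target_meer"]),
     ("subarray_configuration", PySem.Set.ofList ["array_configuration_meer", "array_configuration_ska"])]

def clean_overrides (overrides : List String) : List String :=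
  (OVERRIDE_DOUBLE_ENTRIES.items).foldl
    (fun output pe =>
      let output' := if (PySem.Set.diff pe.2 output).isEmpty then PySem.Set.union output [pe.1] else output
      PySem.Set.diff output' pe.2)
    overrides

-- ===== PORT B =====
def FLAG_TO_PARAM : PySem.Dict String String :=
  PySem.Dict.ofList
    [("alpha_ska", "alpha"), ("alpha_meer", "alpha"),
     ("target_ska", "target"), ("target_meer", "target"),
     ("array_configuration_meer", "subarray_configuration"),
     ("array_configuration_ska", "subarray_configuration")]

def PARAMETERS : List String := ["alpha", "target", "subarray_configuration"]

def clean_overrides_alt (overrides : List String) : List String :=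
  let st := overrides.foldl
    (fun (acc : PySem.Set String × PySem.Dict String Int) x =>
      if FLAG_TO_PARAM.contains x then
        -- 'p = FLAG_TO_PARAM[x]': the key is present, so the lookup is the getD value
        (acc.1, acc.2.insert ((FLAG_TO_PARAM.get? x).getD "") (acc.2.getD ((FLAG_TO_PARAM.get? x).getD "") 0 + 1))
      else
        (PySem.Set.add acc.1 x, acc.2))
    (PySem.Set.empty, PySem.Dict.empty)
  PySem.Set.union st.1 (PARAMETERS.filter (fun p => st.2.getD p 0 == 2))

-- ===== PRECONDITION & SPEC =====
-- The Python parameter is a set; per the type convention the list holds its DISTINCT elements,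
-- so Pre_ only states that encoding (a list with duplicates encodes no Python input).
def Pre_clean_overrides (overrides : List String) : Prop := overrides.Nodup
instance (overrides : List String) : Decidable (Pre_clean_overrides overrides) := by unfold Pre_clean_overrides; infer_instance
def pvWitness_clean_overrides : List String := ["alpha_ska", "alpha_meer", "target_ska", "zoom"]

def Spec_clean_overrides (overrides : List String) (out : List String) : Prop := out = clean_overrides_alt overrides
instance (overrides : List String) (out : List String) : Decidable (Spec_clean_overrides overrides out) := by unfold Spec_clean_overrides; infer_instance

-- ===== CLAIM (what is proved, stated in full; the proofs are below) =====
def Claim_equal_clean_overrides : Prop := ∀ (overrides : List String), Dom_clean_overrides overrides → Pre_clean_overrides overrides → Spec_clean_overrides overrides (clean_overrides overrides)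

-- ===== LEMMAS AND PROOFS =====

-- one iteration of A's loop, for one (parameter, {flag1, flag2}) entry
theorem stageL (p f1 f2 : String) (h1 : p ≠ f1) (h2 : p ≠ f2) (o : List String) :
    PySem.Set.diff (if (PySem.Set.diff [f1, f2] o).isEmpty then PySem.Set.union o [p] else o) [f1, f2]
      = o.filter (fun x => !decide (x = f1) && !decide (x = f2))
        ++ (if f1 ∈ o ∧ f2 ∈ o ∧ p ∉ o then [p] else []) := by
  by_cases m1 : f1 ∈ o <;> by_cases m2 : f2 ∈ o <;> by_cases mp : p ∈ o <;>
    simp [PySem.Set.diff, PySem.Set.union, PySem.Set.update,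
      List.filter_append, m1, m2, mp, h1, h2, List.filter]

-- "x is none of the six double flags"
def nfA (a : String) : Bool :=
  !decide (a = "array_configuration_meer") && !decide (a = "array_configuration_ska") &&
    (!decide (a = "target_ska") && !decide (a = "target_meer") &&
      (!decide (a = "alpha_ska") && !decide (a = "alpha_meer")))

theorem A_norm (o : List String) :
    clean_overrides o =
      o.filter nfA
      ++ (if "alpha_ska" ∈ o ∧ "alpha_meer" ∈ o ∧ "alpha" ∉ o then ["alpha"] else [])
      ++ (if "target_ska" ∈ o ∧ "target_meer" ∈ o ∧ "target" ∉ o then ["target"] else [])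
      ++ (if "array_configuration_meer" ∈ o ∧ "array_configuration_ska" ∈ o ∧ "subarray_configuration" ∉ o then ["subarray_configuration"] else []) := by
  have hitems : OVERRIDE_DOUBLE_ENTRIES.items =
      [("alpha", ["alpha_ska", "alpha_meer"]),
       ("target", ["target_ska", "target_meer"]),
       ("subarray_configuration", ["array_configuration_meer", "array_configuration_ska"])] := by decide
  unfold clean_overrides
  rw [hitems]
  simp only [List.foldl]
  rw [stageL _ _ _ (by decide) (by decide),
      stageL _ _ _ (by decide) (by decide),
      stageL _ _ _ (by decide) (by decide)]
  have mem_ite : ∀ (c : Prop) (inst : Decidable c) (a : String) (xs ys : List String),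
      (a ∈ (if c then xs else ys)) ↔ (if c then a ∈ xs else a ∈ ys) := by
    intros c inst a xs ys; split <;> rfl
  have filter_ite : ∀ (c : Prop) (inst : Decidable c) (f : String → Bool) (xs ys : List String),
      List.filter f (if c then xs else ys) = if c then List.filter f xs else List.filter f ys := by
    intros c inst f xs ys; split <;> rfl
  simp [List.filter_append, List.filter_filter, List.mem_append, List.mem_filter, mem_ite, filter_ite, List.filter]
  rfl

-- B's loop over a pair of accumulators is the two loops on the components
theorem bsplit (o : List String) (k : PySem.Set String) (d : PySem.Dict String Int) :
    o.foldl
      (fun (acc : PySem.Set String × PySem.Dict String Int) x =>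
        if FLAG_TO_PARAM.contains x then
          (acc.1, acc.2.insert ((FLAG_TO_PARAM.get? x).getD "") (acc.2.getD ((FLAG_TO_PARAM.get? x).getD "") 0 + 1))
        else
          (PySem.Set.add acc.1 x, acc.2))
      (k, d)
    = (o.foldl (fun k x => if FLAG_TO_PARAM.contains x then k else PySem.Set.add k x) k,
       o.foldl (fun d x => if FLAG_TO_PARAM.contains x then
           d.insert ((FLAG_TO_PARAM.get? x).getD "") (d.getD ((FLAG_TO_PARAM.get? x).getD "") 0 + 1) else d) d) := by
  induction o generalizing k d with
  | nil => rfl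
  | cons x t ih => by_cases h : FLAG_TO_PARAM.contains x <;> simp [List.foldl_cons, h, ih]

theorem kept_eq (o : List String) (h : o.Nodup) (k : List String) (hd : ∀ x ∈ o, x ∉ k) :
    o.foldl (fun k x => if FLAG_TO_PARAM.contains x then k else PySem.Set.add k x) k
      = k ++ o.filter (fun x => !FLAG_TO_PARAM.contains x) := by
  induction o generalizing k with
  | nil => simp
  | cons x t ih =>
    rw [List.foldl_cons]
    by_cases hx : FLAG_TO_PARAM.contains x
    · rw [if_pos hx, ih h.of_cons k (fun y hy => hd y (List.mem_cons_of_mem _ hy))]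
      simp [hx]
    · rw [if_neg hx, PySem.Set.add_of_not_mem (hd x (List.mem_cons_self))]
      rw [ih h.of_cons (k ++ [x])
        (by intro y hy; simp [List.mem_append]
            exact ⟨fun hk => hd y (List.mem_cons_of_mem _ hy) hk,
                   fun he => (List.nodup_cons.mp h).1 (he ▸ hy)⟩)]
      simp [hx]

theorem counts_getD (p : String) (o : List String) (d : PySem.Dict String Int) :
    (o.foldl (fun d x => if FLAG_TO_PARAM.contains x then
        d.insert ((FLAG_TO_PARAM.get? x).getD "") (d.getD ((FLAG_TO_PARAM.get? x).getD "") 0 + 1) else d) d).getD p 0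
      = d.getD p 0 + (o.countP (fun x => FLAG_TO_PARAM.contains x && ((FLAG_TO_PARAM.get? x).getD "" == p)) : Int) := by
  induction o generalizing d with
  | nil => simp
  | cons x t ih =>
    rw [List.foldl_cons, List.countP_cons]
    by_cases hx : FLAG_TO_PARAM.contains x
    · rw [if_pos hx, ih]
      by_cases hpq : p = (FLAG_TO_PARAM.get? x).getD ""
      · simp [hx, hpq]; omega
      · have hqp : ¬ (FLAG_TO_PARAM.get? x).getD "" = p := fun h => hpq h.symm
        simp [hx, PySem.Dict.getD_insert, hpq, hqp]
    · rw [if_neg hx, ih]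
      simp [hx]

theorem countP_two (f1 f2 : String) (hne : f1 ≠ f2) (o : List String) (h : o.Nodup) :
    (o.countP (fun x => decide (x = f1) || decide (x = f2)) = 2) ↔ (f1 ∈ o ∧ f2 ∈ o) := by
  have split : o.countP (fun x => decide (x = f1) || decide (x = f2)) = o.count f1 + o.count f2 := by
    induction o with
    | nil => simp
    | cons x t ih =>
      rw [List.countP_cons, List.count_cons, List.count_cons, ih h.of_cons]
      by_cases hx1 : x = f1 <;> by_cases hx2 : x = f2 <;>
        simp [hx1, hx2, hne, Ne.symm hne] <;> omega
  have c1 := List.nodup_iff_count_le_one.mp h f1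
  have c2 := List.nodup_iff_count_le_one.mp h f2
  rw [split, ← List.count_pos_iff, ← List.count_pos_iff]
  omega

theorem FTP_mk : FLAG_TO_PARAM = PySem.Dict.mk
    [("alpha_ska", "alpha"), ("alpha_meer", "alpha"),
     ("target_ska", "target"), ("target_meer", "target"),
     ("array_configuration_meer", "subarray_configuration"),
     ("array_configuration_ska", "subarray_configuration")] := by decide

theorem get?_none (x : String) (e1 : x ≠ "alpha_ska") (e2 : x ≠ "alpha_meer")
    (e3 : x ≠ "target_ska") (e4 : x ≠ "target_meer")
    (e5 : x ≠ "array_configuration_meer") (e6 : x ≠ "array_configuration_ska") :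
    FLAG_TO_PARAM.get? x = none := by
  rw [FTP_mk]
  simp [PySem.Dict.get?,
    beq_eq_false_iff_ne.mpr (Ne.symm e1), beq_eq_false_iff_ne.mpr (Ne.symm e2),
    beq_eq_false_iff_ne.mpr (Ne.symm e3), beq_eq_false_iff_ne.mpr (Ne.symm e4),
    beq_eq_false_iff_ne.mpr (Ne.symm e5), beq_eq_false_iff_ne.mpr (Ne.symm e6)]

theorem nf_eq (x : String) : (!FLAG_TO_PARAM.contains x) = nfA x := by
  by_cases e1 : x = "alpha_ska"; · subst e1; decide
  by_cases e2 : x = "alpha_meer"; · subst e2; decide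
  by_cases e3 : x = "target_ska"; · subst e3; decide
  by_cases e4 : x = "target_meer"; · subst e4; decide
  by_cases e5 : x = "array_configuration_meer"; · subst e5; decide
  by_cases e6 : x = "array_configuration_ska"; · subst e6; decide
  simp [PySem.Dict.contains_eq_isSome_get?, get?_none x e1 e2 e3 e4 e5 e6, nfA, e1, e2, e3, e4, e5, e6]

theorem pred_alpha (x : String) :
    (FLAG_TO_PARAM.contains x && ((FLAG_TO_PARAM.get? x).getD "" == "alpha")) = (decide (x = "alpha_ska") || decide (x = "alpha_meer")) := by
  by_cases e1 : x = "alpha_ska"; · subst e1; decide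
  by_cases e2 : x = "alpha_meer"; · subst e2; decide
  by_cases e3 : x = "target_ska"; · subst e3; decide
  by_cases e4 : x = "target_meer"; · subst e4; decide
  by_cases e5 : x = "array_configuration_meer"; · subst e5; decide
  by_cases e6 : x = "array_configuration_ska"; · subst e6; decide
  simp [PySem.Dict.contains_eq_isSome_get?, get?_none x e1 e2 e3 e4 e5 e6, e1, e2]

theorem pred_target (x : String) :
    (FLAG_TO_PARAM.contains x && ((FLAG_TO_PARAM.get? x).getD "" == "target")) = (decide (x = "target_ska") || decide (x = "target_meer")) := by
  by_cases e1 : x = "alpha_ska"; · subst e1; decide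
  by_cases e2 : x = "alpha_meer"; · subst e2; decide
  by_cases e3 : x = "target_ska"; · subst e3; decide
  by_cases e4 : x = "target_meer"; · subst e4; decide
  by_cases e5 : x = "array_configuration_meer"; · subst e5; decide
  by_cases e6 : x = "array_configuration_ska"; · subst e6; decide
  simp [PySem.Dict.contains_eq_isSome_get?, get?_none x e1 e2 e3 e4 e5 e6, e3, e4]

theorem pred_sub (x : String) :
    (FLAG_TO_PARAM.contains x && ((FLAG_TO_PARAM.get? x).getD "" == "subarray_configuration")) = (decide (x = "array_configuration_meer") || decide (x = "array_configuration_ska")) := by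
  by_cases e1 : x = "alpha_ska"; · subst e1; decide
  by_cases e2 : x = "alpha_meer"; · subst e2; decide
  by_cases e3 : x = "target_ska"; · subst e3; decide
  by_cases e4 : x = "target_meer"; · subst e4; decide
  by_cases e5 : x = "array_configuration_meer"; · subst e5; decide
  by_cases e6 : x = "array_configuration_ska"; · subst e6; decide
  simp [PySem.Dict.contains_eq_isSome_get?, get?_none x e1 e2 e3 e4 e5 e6, e5, e6]

theorem filter_params (o : List String) (h : o.Nodup) :
    PARAMETERS.filter (fun p => (o.foldl (fun (d : PySem.Dict String Int) x => if FLAG_TO_PARAM.contains x then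
        d.insert ((FLAG_TO_PARAM.get? x).getD "") (d.getD ((FLAG_TO_PARAM.get? x).getD "") 0 + 1) else d) PySem.Dict.empty).getD p 0 == 2)
      = (if "alpha_ska" ∈ o ∧ "alpha_meer" ∈ o then ["alpha"] else [])
        ++ (if "target_ska" ∈ o ∧ "target_meer" ∈ o then ["target"] else [])
        ++ (if "array_configuration_meer" ∈ o ∧ "array_configuration_ska" ∈ o then ["subarray_configuration"] else []) := by
  have hcnt : ∀ p : String, ((o.foldl (fun (d : PySem.Dict String Int) x => if FLAG_TO_PARAM.contains x then
        d.insert ((FLAG_TO_PARAM.get? x).getD "") (d.getD ((FLAG_TO_PARAM.get? x).getD "") 0 + 1) else d) PySem.Dict.empty).getD p 0 == 2)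
      = decide (o.countP (fun x => FLAG_TO_PARAM.contains x && ((FLAG_TO_PARAM.get? x).getD "" == p)) = 2) := by
    intro p
    rw [counts_getD p o PySem.Dict.empty]
    simp only [PySem.Dict.getD_empty, zero_add]
    exact decide_eq_decide.mpr (by omega)
  have ia : ∀ x ∈ o, (FLAG_TO_PARAM.contains x && ((FLAG_TO_PARAM.get? x).getD "" == "alpha")) = true
      ↔ (decide (x = "alpha_ska") || decide (x = "alpha_meer")) = true := fun x _ => by rw [pred_alpha x]
  have it : ∀ x ∈ o, (FLAG_TO_PARAM.contains x && ((FLAG_TO_PARAM.get? x).getD "" == "target")) = true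
      ↔ (decide (x = "target_ska") || decide (x = "target_meer")) = true := fun x _ => by rw [pred_target x]
  have is' : ∀ x ∈ o, (FLAG_TO_PARAM.contains x && ((FLAG_TO_PARAM.get? x).getD "" == "subarray_configuration")) = true
      ↔ (decide (x = "array_configuration_meer") || decide (x = "array_configuration_ska")) = true := fun x _ => by rw [pred_sub x]
  simp only [PARAMETERS, List.filter, hcnt]
  rw [List.countP_congr ia, List.countP_congr it, List.countP_congr is']
  simp only [countP_two "alpha_ska" "alpha_meer" (by decide) o h,
      countP_two "target_ska" "target_meer" (by decide) o h,
      countP_two "array_configuration_meer" "array_configuration_ska" (by decide) o h]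
  by_cases d1 : "alpha_ska" ∈ o ∧ "alpha_meer" ∈ o <;>
  by_cases d2 : "target_ska" ∈ o ∧ "target_meer" ∈ o <;>
  by_cases d3 : "array_configuration_meer" ∈ o ∧ "array_configuration_ska" ∈ o <;>
    simp [d1, d2, d3]

theorem final (o : List String) (h : o.Nodup) : clean_overrides o = clean_overrides_alt o := by
  rw [A_norm]
  unfold clean_overrides_alt
  rw [bsplit]
  simp only
  rw [kept_eq o h PySem.Set.empty (by simp)]
  rw [show (PySem.Set.empty : PySem.Set String) ++ List.filter (fun x => !FLAG_TO_PARAM.contains x) o = List.filter (fun x => !FLAG_TO_PARAM.contains x) o from List.nil_append _]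
  rw [filter_params o h]
  rw [List.filter_congr (fun x _ => nf_eq x)]
  have hka : ("alpha" ∈ List.filter nfA o) ↔ "alpha" ∈ o := by simp [List.mem_filter, nfA]
  have hkt : ("target" ∈ List.filter nfA o) ↔ "target" ∈ o := by simp [List.mem_filter, nfA]
  have hks : ("subarray_configuration" ∈ List.filter nfA o) ↔ "subarray_configuration" ∈ o := by
    simp [List.mem_filter, nfA]
  by_cases d1 : "alpha_ska" ∈ o ∧ "alpha_meer" ∈ o <;>
  by_cases d2 : "target_ska" ∈ o ∧ "target_meer" ∈ o <;>
  by_cases d3 : "array_configuration_meer" ∈ o ∧ "array_configuration_ska" ∈ o <;>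
  by_cases q1 : ("alpha" : String) ∈ o <;>
  by_cases q2 : ("target" : String) ∈ o <;>
  by_cases q3 : ("subarray_configuration" : String) ∈ o <;>
    simp [d1, d2, d3, q1, q2, q3, PySem.Set.union, PySem.Set.update,
      List.mem_append, hka, hkt, hks, List.append_assoc]

-- ===== VERDICT (by name: the statement is the Claim_ definition above) =====
theorem clean_overrides_spec : Claim_equal_clean_overrides := by
  intro o _ hpre
  unfold Spec_clean_overrides
  exact final o hpre
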